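-- pv_equiv track=rewrite | github.com/cdskc/inv-adjustments | processing.py | _find_zero_sum_indices
-- ===== SOURCE A (Python) =====
-- def _find_zero_sum_indices(quantities: list[int]) -> list[int]:
--     """Return local indices of the largest subset of *quantities* that sums to zero.
--
--     Uses bitmask enumeration — feasible because real-world groups rarely exceed
--     ~10 rows.  Falls back to a whole-group sum check for groups larger than 24.
--     """
--     n = len(quantities)
--     if n == 0:
--         return []
--
--     # Fast path: entire group balances
--     if sum(quantities) == 0:
--         return list(range(n))
--
--     # Bitmask search for the largest zero-sum subset
--     if n > 24:  # safety cap; 2^24 ≈ 16M — still fast, but unlikely in practice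
--         return []
--
--     best_mask = 0
--     best_count = 0
--     for mask in range(1, 1 << n):
--         s = 0
--         cnt = 0
--         for i in range(n):
--             if mask >> i & 1:
--                 s += quantities[i]
--                 cnt += 1
--         if s == 0 and cnt > best_count:
--             best_count = cnt
--             best_mask = mask
--
--     return [i for i in range(n) if best_mask >> i & 1]
-- ===== SOURCE B (Python) =====
-- def _find_zero_sum_indices(quantities: list[int]) -> list[int]:
--     """Meet-in-the-middle: hash the low half's (sum, size) -> minimal mask and
--     join it with complementary high-half sums, instead of scanning all 2^n masks."""
--     n = len(quantities)
--     if sum(quantities) == 0: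
--         return list(range(n))
--     if n > 24:
--         return []
--     h = n // 2
--     # minimal low mask for every (sum, popcount) over the first h elements
--     table = {}
--     for lm in range(1 << h):
--         s = 0
--         c = 0
--         for i in range(h):
--             if lm >> i & 1:
--                 s += quantities[i]
--                 c += 1
--         table.setdefault((s, c), lm)
--     best_mask = 0
--     best_count = 0
--     for hm in range(1 << (n - h)):
--         s = 0
--         c = 0
--         for i in range(n - h):
--             if hm >> i & 1:
--                 s += quantities[h + i]
--                 c += 1
--         for lc in range(h + 1):
--             lm = table.get((-s, lc))
--             if lm is not None and c + lc > best_count: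
--                 best_count = c + lc
--                 best_mask = hm << h | lm
--     return [i for i in range(n) if best_mask >> i & 1]
-- ===== Notes on version B (the rewrite author's own statement) =====
-- stated objective: alternative
-- what changed: Replaces the single scan of all 2^n bitmasks with meet-in-the-middle: a hash table maps each (sum, popcount) of the low half to its minimal mask, then each high-half mask is joined with the complementary low sum, reproducing A's best-count/smallest-mask choice.
import Mathlib
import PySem

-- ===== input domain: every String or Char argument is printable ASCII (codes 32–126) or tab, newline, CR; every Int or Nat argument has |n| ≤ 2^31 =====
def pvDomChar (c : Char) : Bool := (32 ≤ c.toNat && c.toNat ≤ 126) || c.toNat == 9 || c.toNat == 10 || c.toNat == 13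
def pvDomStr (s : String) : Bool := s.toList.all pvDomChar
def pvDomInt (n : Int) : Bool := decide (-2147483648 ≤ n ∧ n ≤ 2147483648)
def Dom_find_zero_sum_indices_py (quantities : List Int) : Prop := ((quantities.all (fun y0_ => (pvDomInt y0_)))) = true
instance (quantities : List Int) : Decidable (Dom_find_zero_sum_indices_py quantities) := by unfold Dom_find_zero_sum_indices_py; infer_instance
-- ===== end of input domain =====

-- B replaces A's scan of all 2^n bitmasks by meet-in-the-middle (hash-join of complementary
-- half-sums); the theorems prove the two ports return the same list on every input.

-- ===== PORT A =====
def find_zero_sum_indices_py (quantities : List Int) : List Int :=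
  let n : Int := (quantities.length : Int)
  if n = 0 then []
  else if quantities.sum = 0 then PySem.List.pyRange 0 n 1
  else if 24 < n then []
  else
    let best := (PySem.List.pyRange 1 ((1 : Int) <<< n.toNat) 1).foldl
      (fun (best : Int × Int) mask =>
        let sc := (PySem.List.pyRange 0 n 1).foldl
          (fun (sc : Int × Int) i =>
            if PySem.Int.band (mask >>> i.toNat) 1 ≠ 0 then
              (sc.1 + PySem.List.pyGetD quantities i 0, sc.2 + 1)
            else sc) (0, 0)
        if sc.1 = 0 ∧ sc.2 > best.2 then (mask, sc.2) else best)
      (0, 0)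
    (PySem.List.pyRange 0 n 1).filter (fun i => PySem.Int.band (best.1 >>> i.toNat) 1 ≠ 0)

-- ===== PORT B =====
def find_zero_sum_indices_py_alt (quantities : List Int) : List Int :=
  let n : Int := (quantities.length : Int)
  if quantities.sum = 0 then PySem.List.pyRange 0 n 1
  else if 24 < n then []
  else
    let h : Int := PySem.Int.floordiv n 2
    let table := (PySem.List.pyRange 0 ((1 : Int) <<< h.toNat) 1).foldl
      (fun (t : PySem.Dict (Int × Int) Int) lm =>
        let sc := (PySem.List.pyRange 0 h 1).foldl
          (fun (sc : Int × Int) i =>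
            if PySem.Int.band (lm >>> i.toNat) 1 ≠ 0 then
              (sc.1 + PySem.List.pyGetD quantities i 0, sc.2 + 1)
            else sc) (0, 0)
        t.setdefault (sc.1, sc.2) lm) PySem.Dict.empty
    let best := (PySem.List.pyRange 0 ((1 : Int) <<< (n - h).toNat) 1).foldl
      (fun (best : Int × Int) (hm : Int) =>
        let sc := (PySem.List.pyRange 0 (n - h) 1).foldl
          (fun (sc : Int × Int) i =>
            if PySem.Int.band (hm >>> i.toNat) 1 ≠ 0 then
              (sc.1 + PySem.List.pyGetD quantities (h + i) 0, sc.2 + 1)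
            else sc) (0, 0)
        (PySem.List.pyRange 0 (h + 1) 1).foldl
          (fun (best : Int × Int) lc =>
            match table.get? (-sc.1, lc) with
            | some lm => if sc.2 + lc > best.2 then (PySem.Int.bor (hm <<< h.toNat) lm, sc.2 + lc) else best
            | none => best) best)
      (0, 0)
    (PySem.List.pyRange 0 n 1).filter (fun i => PySem.Int.band (best.1 >>> i.toNat) 1 ≠ 0)

-- ===== PRECONDITION & SPEC =====
def Spec_find_zero_sum_indices_py (quantities : List Int) (out : List Int) : Prop := out = find_zero_sum_indices_py_alt quantities
instance (quantities : List Int) (out : List Int) : Decidable (Spec_find_zero_sum_indices_py quantities out) := by unfold Spec_find_zero_sum_indices_py; infer_instance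

-- ===== CLAIM (what is proved, stated in full; the proofs are below) =====
def Claim_equal_find_zero_sum_indices_py : Prop := ∀ (quantities : List Int), Dom_find_zero_sum_indices_py quantities → Spec_find_zero_sum_indices_py quantities (find_zero_sum_indices_py quantities)

-- ===== LEMMAS AND PROOFS =====
-- ===== proof layer =====

/-- sum of the elements of `l` selected by the low bits of the mask `m` -/
def bitSum : List Int → Nat → Int
  | [], _ => 0
  | x :: t, m => (if m % 2 = 1 then x else 0) + bitSum t (m / 2)

/-- number of elements of `l` selected by the low bits of the mask `m` -/
def bitCnt : List Int → Nat → Int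
  | [], _ => 0
  | x :: t, m => (if m % 2 = 1 then 1 else 0) + bitCnt t (m / 2)

theorem bitSum_append (u v : List Int) (m : Nat) :
    bitSum (u ++ v) m = bitSum u m + bitSum v (m >>> u.length) := by
  induction u generalizing m with
  | nil => simp [bitSum]
  | cons x t ih =>
      simp only [List.cons_append, bitSum, ih, List.length_cons]
      rw [show m >>> (t.length + 1) = (m / 2) >>> t.length by
        rw [Nat.add_comm, Nat.shiftRight_add, Nat.shiftRight_one]]
      ring

theorem bitCnt_append (u v : List Int) (m : Nat) :
    bitCnt (u ++ v) m = bitCnt u m + bitCnt v (m >>> u.length) := by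
  induction u generalizing m with
  | nil => simp [bitCnt]
  | cons x t ih =>
      simp only [List.cons_append, bitCnt, ih, List.length_cons]
      rw [show m >>> (t.length + 1) = (m / 2) >>> t.length by
        rw [Nat.add_comm, Nat.shiftRight_add, Nat.shiftRight_one]]
      ring

theorem bitSum_mod (l : List Int) (m : Nat) : bitSum l (m % 2 ^ l.length) = bitSum l m := by
  induction l generalizing m with
  | nil => simp [bitSum]
  | cons x t ih =>
      have h1 : m % 2 ^ (t.length + 1) % 2 = m % 2 := Nat.mod_mod_of_dvd _ ⟨2 ^ t.length, by ring⟩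
      have h2 : m % 2 ^ (t.length + 1) / 2 = m / 2 % 2 ^ t.length := by
        rw [show (2:Nat) ^ (t.length + 1) = 2 * 2 ^ t.length by ring, Nat.mod_mul_right_div_self]
      simp only [bitSum, List.length_cons, h1, h2, ih]

theorem bitCnt_mod (l : List Int) (m : Nat) : bitCnt l (m % 2 ^ l.length) = bitCnt l m := by
  induction l generalizing m with
  | nil => simp [bitCnt]
  | cons x t ih =>
      have h1 : m % 2 ^ (t.length + 1) % 2 = m % 2 := Nat.mod_mod_of_dvd _ ⟨2 ^ t.length, by ring⟩
      have h2 : m % 2 ^ (t.length + 1) / 2 = m / 2 % 2 ^ t.length := by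
        rw [show (2:Nat) ^ (t.length + 1) = 2 * 2 ^ t.length by ring, Nat.mod_mul_right_div_self]
      simp only [bitCnt, List.length_cons, h1, h2, ih]

theorem bitCnt_natAbs (l : List Int) (m : Nat) : ∃ k : Nat, k ≤ l.length ∧ bitCnt l m = (k : Int) := by
  induction l generalizing m with
  | nil => exact ⟨0, by simp [bitCnt]⟩
  | cons x t ih =>
      obtain ⟨k, hk, he⟩ := ih (m / 2)
      by_cases h : m % 2 = 1
      · exact ⟨k + 1, by simpa using Nat.succ_le_succ hk, by simp [bitCnt, h, he]; ring⟩
      · exact ⟨k, by simpa using Nat.le_succ_of_le hk, by simp [bitCnt, h, he]⟩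

theorem band_bit (m i : Nat) :
    (PySem.Int.band (((m : Nat) : Int) >>> ((i : Nat) : Int)) 1 ≠ 0) ↔ ((m >>> i) % 2 = 1) := by
  rw [Int.shiftRight_natCast, show (1 : Int) = ((1 : Nat) : Int) from rfl, PySem.Int.band_natCast,
    Nat.and_one_is_mod]
  omega

/-- the generic bit-test loop over indices `off, …, off+len-1` -/
theorem loop_eq (q : List Int) (m : Nat) (off len : Nat) (hlen : off + len ≤ q.length) (s c : Int) :
    (PySem.List.pyRange 0 (len : Int) 1).foldl
      (fun (sc : Int × Int) i =>
        if PySem.Int.band (((m : Nat) : Int) >>> i.toNat) 1 ≠ 0 then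
          (sc.1 + PySem.List.pyGetD q ((off : Int) + i) 0, sc.2 + 1)
        else sc) (s, c)
    = (s + bitSum ((q.drop off).take len) m, c + bitCnt ((q.drop off).take len) m) := by
  induction len with
  | zero =>
      rw [show ((0 : Nat) : Int) = 0 from rfl, PySem.List.pyRange_one_eq_nil le_rfl]
      simp [bitSum, bitCnt]
  | succ len ih =>
      have hlt : off + len < q.length := by omega
      have hlen2 : len < (q.drop off).length := by simp; omega
      rw [show ((len + 1 : Nat) : Int) = ((len : Nat) : Int) + 1 by push_cast; ring,
        PySem.List.pyRange_one_succ_right (by positivity), List.foldl_append, ih (by omega)]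
      have hT : ((q.drop off).take (len + 1)) = (q.drop off).take len ++ [q[off + len]] := by
        rw [List.take_add_one, List.getElem?_eq_getElem hlen2]
        simp [List.getElem_drop]
      have hTl : ((q.drop off).take len).length = len := List.length_take_of_le (by omega)
      rw [hT, bitSum_append, bitCnt_append, hTl]
      simp only [List.foldl_cons, List.foldl_nil, Int.toNat_natCast]
      have hg : PySem.List.pyGetD q ((off : Int) + ((len : Nat) : Int)) 0 = q[off + len] := by
        rw [show (off : Int) + ((len : Nat) : Int) = ((off + len : Nat) : Int) by push_cast; ring,
          PySem.List.pyGetD_natCast, List.getD_eq_getElem _ _ hlt]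
      by_cases hb : (m >>> len) % 2 = 1
      · rw [if_pos ((band_bit m len).mpr hb)]
        simp only [hg, bitSum, bitCnt, if_pos hb, Prod.mk.injEq]
        constructor <;> ring
      · rw [if_neg (by simpa using fun hc => hb ((band_bit m len).mp hc))]
        simp only [bitSum, bitCnt, if_neg hb, Prod.mk.injEq]
        constructor <;> ring

/-- strict-improvement update, the shape of A's and B's best-so-far loops -/
def upd (st e : Int × Int) : Int × Int := if e.2 > st.2 then e else st

theorem wins_snd (L : List (Int × Int)) (st : Int × Int) :
    (L.foldl upd st).2 = (L.map (·.2)).foldl max st.2 := by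
  induction L generalizing st with
  | nil => rfl
  | cons x t ih =>
      simp only [List.foldl_cons, List.map_cons, ih, upd]
      split <;> [rw [max_eq_right (by omega)]; rw [max_eq_left (by omega)]]

theorem wins_stay (L : List (Int × Int)) (st : Int × Int) (h : ∀ e ∈ L, e.2 ≤ st.2) :
    L.foldl upd st = st := by
  induction L with
  | nil => rfl
  | cons x t ih =>
      simp only [List.foldl_cons, upd]
      rw [if_neg (by have := h x (by simp); omega)]
      exact ih (fun e he => h e (by simp [he]))

theorem wins_progress (L : List (Int × Int)) (st : Int × Int) :
    L.foldl upd st = st ∨ st.2 < (L.foldl upd st).2 := by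
  induction L generalizing st with
  | nil => left; rfl
  | cons x t ih =>
      simp only [List.foldl_cons, upd]
      split
      · rcases ih x with h | h
        · right; rw [h]; omega
        · right; omega
      · exact ih st

theorem wins_eq_find (L : List (Int × Int)) (st : Int × Int)
    (h : st.2 < (L.foldl upd st).2) :
    L.find? (fun e => e.2 == (L.foldl upd st).2) = some (L.foldl upd st) := by
  induction L generalizing st with
  | nil => simp at h
  | cons x t ih =>
      simp only [List.foldl_cons] at h ⊢
      by_cases hx : x.2 > st.2
      · simp only [upd, if_pos hx] at h ⊢
        rcases wins_progress t x with he | hlt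
        · rw [he, List.find?_cons_of_pos (by simp)]
        · rw [List.find?_cons_of_neg (by simp; omega)]
          exact ih x hlt
      · simp only [upd, if_neg hx] at h ⊢
        rw [List.find?_cons_of_neg (by simp; omega)]
        exact ih st h

theorem find?_unique {α : Type} (l : List α) (p : α → Bool) (a : α)
    (ha : a ∈ l) (hpa : p a = true) (huniq : ∀ x ∈ l, p x = true → x = a) :
    l.find? p = some a := by
  induction l with
  | nil => simp at ha
  | cons x t ih =>
      by_cases hx : p x = true
      · rw [List.find?_cons_of_pos hx, huniq x (by simp) hx]
      · rw [List.find?_cons_of_neg hx]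
        rcases List.mem_cons.mp ha with rfl | hmem
        · exact absurd hpa hx
        · exact ih hmem (fun y hy => huniq y (by simp [hy]))

theorem setdefault_get? (d : PySem.Dict (Int × Int) Int) (k k' : Int × Int) (v : Int) :
    (d.setdefault k v).get? k' =
      if k' = k then some ((d.get? k).getD v) else d.get? k' := by
  simp only [PySem.Dict.setdefault, PySem.Dict.get?, PySem.Dict.contains]
  by_cases hc : (d.items.any fun p => p.1 == k) = true
  · rw [if_pos hc]
    rcases List.any_eq_true.mp hc with ⟨p, hp, hpk⟩
    have hfind : (d.items.find? fun p => p.1 == k).isSome := by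
      rw [List.find?_isSome]; exact ⟨p, hp, hpk⟩
    by_cases hk : k' = k
    · subst hk
      obtain ⟨e, he⟩ := Option.isSome_iff_exists.mp hfind
      simp [he]
    · simp [hk]
  · rw [if_neg hc]
    have hfind : d.items.find? (fun p => p.1 == k) = none := by
      rw [List.find?_eq_none]
      intro p hp hpk
      exact hc (List.any_eq_true.mpr ⟨p, hp, hpk⟩)
    by_cases hk : k' = k
    · subst hk
      simp [List.find?_append, hfind]
    · simp only [if_neg hk, List.find?_append]
      have h2 : ([(k, v)].find? fun p => p.1 == k') = none := by
        simp [List.find?_cons, show ¬ (k == k') = true by simp [Ne.symm hk]]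
      rw [h2]
      simp

theorem fold_setdefault_get (sig : Nat → Int × Int) (l : List Nat) (d : PySem.Dict (Int × Int) Int)
    (key : Int × Int) :
    (l.foldl (fun t lm => t.setdefault (sig lm) ((lm : Nat) : Int)) d).get? key
      = ((d.get? key).or ((l.find? (fun lm => sig lm == key)).map (fun lm => ((lm : Nat) : Int)))) := by
  induction l generalizing d with
  | nil => simp
  | cons a t ih =>
      simp only [List.foldl_cons, ih, setdefault_get? d (sig a) key ((a : Nat) : Int)]
      by_cases hk : key = sig a
      · rw [if_pos hk, List.find?_cons_of_pos (by simp [hk])]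
        cases hd : d.get? key <;> simp [← hk, hd]
      · rw [if_neg hk, List.find?_cons_of_neg (by simpa using fun h => hk (by rw [h]))]

/-- candidates A's inner sweep over all low masks contributes for one high mask -/
def candsA (l : List Int) (sh ch : Int) (base : Nat) : List (Int × Int) :=
  ((List.range (2 ^ l.length)).filter (fun lm => bitSum l lm + sh == 0)).map
    (fun lm => (((base + lm : Nat) : Int), bitCnt l lm + ch))

/-- candidates B's per-count table lookups contribute for one high mask -/
def candsB (l : List Int) (sh ch : Int) (base : Nat) : List (Int × Int) :=
  (List.range (l.length + 1)).filterMap (fun (lc : Nat) =>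
    ((List.range (2 ^ l.length)).find? (fun lm => (bitSum l lm, bitCnt l lm) == (-sh, ((lc : Nat) : Int)))).map
      (fun lm => (((base + lm : Nat) : Int), ch + ((lc : Nat) : Int))))

theorem candsB_subset (l : List Int) (sh ch : Int) (base : Nat) :
    ∀ e ∈ candsB l sh ch base, e ∈ candsA l sh ch base := by
  intro e he
  obtain ⟨lc, _hlc, hG⟩ := List.mem_filterMap.mp he
  obtain ⟨lm, hfind, hFe⟩ := Option.map_eq_some_iff.mp hG
  have hmem := List.mem_of_find?_eq_some hfind
  have hprop := List.find?_some hfind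
  simp only [beq_iff_eq, Prod.mk.injEq] at hprop
  refine List.mem_map.mpr ⟨lm, List.mem_filter.mpr ⟨hmem, by simp [hprop.1]⟩, ?_⟩
  rw [← hFe, hprop.2]
  simp [Int.add_comm]

theorem candsA_snd_covered (l : List Int) (sh ch : Int) (base : Nat) :
    ∀ e ∈ candsA l sh ch base, ∃ e' ∈ candsB l sh ch base, e'.2 = e.2 := by
  intro e he
  obtain ⟨lm, hlmf, hFe⟩ := List.mem_map.mp he
  obtain ⟨hlm, hsum⟩ := List.mem_filter.mp hlmf
  simp only [beq_iff_eq] at hsum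
  obtain ⟨kc, hkc, hcnt⟩ := bitCnt_natAbs l lm
  have hfind : ((List.range (2 ^ l.length)).find?
      (fun lm' => (bitSum l lm', bitCnt l lm') == (-sh, ((kc : Nat) : Int)))).isSome := by
    rw [List.find?_isSome]
    refine ⟨lm, hlm, ?_⟩
    simp only [beq_iff_eq, Prod.mk.injEq]
    exact ⟨by omega, hcnt⟩
  obtain ⟨lm0, hlm0⟩ := Option.isSome_iff_exists.mp hfind
  refine ⟨(((base + lm0 : Nat) : Int), ch + ((kc : Nat) : Int)), ?_, ?_⟩
  · exact List.mem_filterMap.mpr ⟨kc, List.mem_range.mpr (by omega), by rw [hlm0]; rfl⟩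
  · rw [← hFe, hcnt]; simp [Int.add_comm]

theorem cands_fold_eq (l : List Int) (sh ch : Int) (base : Nat) (st : Int × Int) :
    (candsA l sh ch base).foldl upd st = (candsB l sh ch base).foldl upd st := by
  have hBsub := candsB_subset l sh ch base
  have hAcov := candsA_snd_covered l sh ch base
  have hAle := PySem.List.le_foldl_max ((candsA l sh ch base).map (·.2)) st.2
  have hBle := PySem.List.le_foldl_max ((candsB l sh ch base).map (·.2)) st.2
  have hAmem := PySem.List.foldl_max_mem ((candsA l sh ch base).map (·.2)) st.2
  have hBmem := PySem.List.foldl_max_mem ((candsB l sh ch base).map (·.2)) st.2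
  have hRA2 := wins_snd (candsA l sh ch base) st
  have hRB2 := wins_snd (candsB l sh ch base) st
  set MA := ((candsA l sh ch base).map (·.2)).foldl max st.2 with hMA
  set MB := ((candsB l sh ch base).map (·.2)).foldl max st.2 with hMB
  have hMAB : MA = MB := by
    have h1 : MA ≤ MB := by
      rcases hAmem with h | h
      · rw [h]; exact hBle.1
      · obtain ⟨e, he, hsnd⟩ := List.mem_map.mp h
        obtain ⟨e', he', hsnd'⟩ := hAcov e he
        rw [← hsnd, ← hsnd']
        exact hBle.2 _ (List.mem_map.mpr ⟨e', he', rfl⟩)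
    have h2 : MB ≤ MA := by
      rcases hBmem with h | h
      · rw [h]; exact hAle.1
      · obtain ⟨e, he, hsnd⟩ := List.mem_map.mp h
        rw [← hsnd]
        have hmm := List.mem_map_of_mem (f := fun x : Int × Int => x.2) (hBsub e he)
        exact hAle.2 _ hmm
    omega
  rcases eq_or_lt_of_le hAle.1 with heq | hlt
  · -- nothing beats the initial state on either side
    rw [wins_stay _ _ (fun e he => by
        have := hAle.2 _ (List.mem_map.mpr ⟨e, he, rfl⟩); omega),
      wins_stay _ _ (fun e he => by
        have := hBle.2 _ (List.mem_map.mpr ⟨e, he, rfl⟩); omega)]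
  · -- a real winner exists; both folds return the first candidate of count MA
    have hfA := wins_eq_find (candsA l sh ch base) st (by omega)
    have hfB := wins_eq_find (candsB l sh ch base) st (by omega)
    rw [hRA2] at hfA
    rw [hRB2, ← hMAB] at hfB
    -- the max is realized by some low mask
    have hmemMA : MA ∈ (candsA l sh ch base).map (·.2) := by
      rcases hAmem with h | h
      · omega
      · exact h
    obtain ⟨e, he, hesnd⟩ := List.mem_map.mp hmemMA
    obtain ⟨lma, hlmaf, hFea⟩ := List.mem_map.mp he
    obtain ⟨hlma, hsuma⟩ := List.mem_filter.mp hlmaf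
    simp only [beq_iff_eq] at hsuma
    obtain ⟨kc, hkcle, hkc⟩ := bitCnt_natAbs l lma
    have hMAval : MA = ((kc : Nat) : Int) + ch := by
      rw [← hesnd, ← hFea, hkc]
    -- the minimal low mask with signature (-sh, kc)
    have hfindS : ((List.range (2 ^ l.length)).find?
        (fun lm' => (bitSum l lm', bitCnt l lm') == (-sh, ((kc : Nat) : Int)))).isSome := by
      rw [List.find?_isSome]
      refine ⟨lma, hlma, ?_⟩
      simp only [beq_iff_eq, Prod.mk.injEq]
      exact ⟨by omega, hkc⟩
    obtain ⟨lm0, hlm0⟩ := Option.isSome_iff_exists.mp hfindS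
    have hlm0p := List.find?_some hlm0
    simp only [beq_iff_eq, Prod.mk.injEq] at hlm0p
    -- compute A's find?
    have hfA2 : (candsA l sh ch base).find? (fun e => e.2 == MA)
        = some (((base + lm0 : Nat) : Int), bitCnt l lm0 + ch) := by
      unfold candsA
      rw [List.find?_map, List.find?_filter]
      have hpeq : (fun a => decide ((fun lm => bitSum l lm + sh == 0) a = true ∧
            ((fun e => e.2 == MA) ∘ (fun lm => (((base + lm : Nat) : Int), bitCnt l lm + ch))) a = true))
          = (fun lm' => (bitSum l lm', bitCnt l lm') == (-sh, ((kc : Nat) : Int))) := by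
        funext lm'
        rw [Bool.eq_iff_iff]
        simp only [decide_eq_true_eq, Function.comp, beq_iff_eq, Prod.mk.injEq, hMAval]
        constructor
        · rintro ⟨h1, h2⟩; exact ⟨by omega, by omega⟩
        · rintro ⟨h1, h2⟩; exact ⟨by omega, by omega⟩
      rw [hpeq, hlm0]
      rfl
    -- compute B's find?
    have hfB2 : (candsB l sh ch base).find? (fun e => e.2 == MA)
        = some (((base + lm0 : Nat) : Int), ch + ((kc : Nat) : Int)) := by
      unfold candsB
      rw [List.find?_filterMap]
      have houter : (List.range (l.length + 1)).find? (fun (lc : Nat) => Option.any (fun e => e.2 == MA)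
          (((List.range (2 ^ l.length)).find? (fun lm => (bitSum l lm, bitCnt l lm) == (-sh, ((lc : Nat) : Int)))).map
            (fun lm => (((base + lm : Nat) : Int), ch + ((lc : Nat) : Int))))) = some kc := by
        apply find?_unique
        · exact List.mem_range.mpr (by omega)
        · rw [hlm0]
          simp [hMAval, Int.add_comm]
        · intro lc _ hlc
          rw [Option.any_eq_true] at hlc
          obtain ⟨e', he', hsnd'⟩ := hlc
          obtain ⟨lm', hfind', hFe'⟩ := Option.map_eq_some_iff.mp he'
          rw [← hFe'] at hsnd'
          simp only [beq_iff_eq, hMAval] at hsnd'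
          omega
      rw [houter, Option.bind_some, hlm0]
      rfl
    rw [hfA2] at hfA
    rw [hfB2] at hfB
    have := hfA.symm.trans ((Option.some_inj.mpr (by rw [hlm0p.2]; simp [Int.add_comm])).trans hfB)
    exact Option.some_inj.mp this

theorem range_two_pow_flatMap (a b : Nat) :
    List.range (2 ^ (a + b)) =
      (List.range (2 ^ b)).flatMap (fun hm => (List.range (2 ^ a)).map (fun lm => hm * 2 ^ a + lm)) := by
  induction b with
  | zero => simp
  | succ b ih =>
      have h1 : 2 ^ (a + (b + 1)) = 2 ^ (a + b) + 2 ^ (a + b) := by ring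
      have h2 : (2:Nat) ^ (b + 1) = 2 ^ b + 2 ^ b := by ring
      rw [h1, h2, List.range_add, List.range_add, List.flatMap_append, ← ih]
      congr 1
      rw [List.flatMap_map, ih, List.map_flatMap]
      refine congrArg (fun f => List.flatMap f (List.range (2 ^ b))) (funext fun hm => ?_)
      simp only [Function.comp_def, List.map_map, Function.comp]
      refine congrArg (fun f => List.map f (List.range (2 ^ a))) (funext fun lm => ?_)
      ring

theorem bitSum_split (q : List Int) (k : Nat) (hk : k ≤ q.length) (hm lm : Nat) (hlm : lm < 2 ^ k) :
    bitSum q (hm * 2 ^ k + lm) = bitSum (q.take k) lm + bitSum (q.drop k) hm := by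
  conv_lhs => rw [← List.take_append_drop k q]
  rw [bitSum_append]
  have hlen : (q.take k).length = k := List.length_take_of_le hk
  rw [hlen]
  congr 1
  · rw [← bitSum_mod (q.take k) (hm * 2 ^ k + lm), hlen]
    rw [show (hm * 2 ^ k + lm) % 2 ^ k = lm by rw [Nat.mul_add_mod', Nat.mod_eq_of_lt hlm]]
  · rw [Nat.shiftRight_eq_div_pow]
    rw [show (hm * 2 ^ k + lm) / 2 ^ k = hm by
      rw [Nat.mul_comm, Nat.mul_add_div (by positivity), Nat.div_eq_of_lt hlm]; omega]

theorem bitCnt_split (q : List Int) (k : Nat) (hk : k ≤ q.length) (hm lm : Nat) (hlm : lm < 2 ^ k) :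
    bitCnt q (hm * 2 ^ k + lm) = bitCnt (q.take k) lm + bitCnt (q.drop k) hm := by
  conv_lhs => rw [← List.take_append_drop k q]
  rw [bitCnt_append]
  have hlen : (q.take k).length = k := List.length_take_of_le hk
  rw [hlen]
  congr 1
  · rw [← bitCnt_mod (q.take k) (hm * 2 ^ k + lm), hlen]
    rw [show (hm * 2 ^ k + lm) % 2 ^ k = lm by rw [Nat.mul_add_mod', Nat.mod_eq_of_lt hlm]]
  · rw [Nat.shiftRight_eq_div_pow]
    rw [show (hm * 2 ^ k + lm) / 2 ^ k = hm by
      rw [Nat.mul_comm, Nat.mul_add_div (by positivity), Nat.div_eq_of_lt hlm]; omega]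

theorem perhmA (l hq : List Int) (hm : Nat) (st : Int × Int) :
    (List.range (2 ^ l.length)).foldl
      (fun st lm => if bitSum l lm + bitSum hq hm = 0 ∧ bitCnt l lm + bitCnt hq hm > st.2
        then (((hm * 2 ^ l.length + lm : Nat) : Int), bitCnt l lm + bitCnt hq hm) else st) st
    = (candsA l (bitSum hq hm) (bitCnt hq hm) (hm * 2 ^ l.length)).foldl upd st := by
  unfold candsA
  rw [List.foldl_map, List.foldl_filter]
  apply PySem.List.foldl_congr_mem
  intro acc lm _
  by_cases h1 : bitSum l lm + bitSum hq hm = 0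
  · simp [upd, h1]
  · simp [upd, h1]

def canonA (q : List Int) : Int × Int :=
  (List.range (2 ^ (q.length - q.length / 2))).foldl
    (fun st hm => (candsA (q.take (q.length / 2)) (bitSum (q.drop (q.length / 2)) hm)
      (bitCnt (q.drop (q.length / 2)) hm) (hm * 2 ^ (q.length / 2))).foldl upd st) (0, 0)

def canonB (q : List Int) : Int × Int :=
  (List.range (2 ^ (q.length - q.length / 2))).foldl
    (fun st hm => (candsB (q.take (q.length / 2)) (bitSum (q.drop (q.length / 2)) hm)
      (bitCnt (q.drop (q.length / 2)) hm) (hm * 2 ^ (q.length / 2))).foldl upd st) (0, 0)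

/-- a loop 'for x in range(X)' ported over the Int range, re-read over Nat -/
theorem fold_range_shape {α : Type} (F : α → Int → α) (g : α → Nat → α) (X : Nat) (init : α)
    (hbody : ∀ st (m : Nat), F st ((m : Nat) : Int) = g st m) :
    List.foldl F init (PySem.List.pyRange 0 ((X : Nat) : Int) 1) = (List.range X).foldl g init := by
  rw [PySem.List.pyRange_zero_nat, List.foldl_map]
  exact congrArg (fun f => List.foldl f init (List.range X)) (funext fun st => funext fun m => hbody st m)

/-- the same, for a loop 'for x in range(1, X)' whose body ignores 0 -/
theorem fold_range_one_shape (F : Int × Int → Int → Int × Int) (g : Int × Int → Nat → Int × Int)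
    (X : Nat) (hX : 0 < X) (hzero : F (0, 0) 0 = (0, 0))
    (hbody : ∀ st (m : Nat), F st ((m : Nat) : Int) = g st m) :
    List.foldl F (0, 0) (PySem.List.pyRange 1 ((X : Nat) : Int) 1) = (List.range X).foldl g (0, 0) := by
  have hcons : PySem.List.pyRange 0 ((X : Nat) : Int) 1
      = 0 :: PySem.List.pyRange 1 ((X : Nat) : Int) 1 :=
    PySem.List.pyRange_one_cons (by positivity)
  rw [← fold_range_shape F g X (0, 0) hbody, hcons, List.foldl_cons, hzero]

theorem AfoldEq (q : List Int) :
    List.foldl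
      (fun (best : Int × Int) (mask : Int) =>
        if (List.foldl
              (fun (sc : Int × Int) (i : Int) =>
                if PySem.Int.band (mask >>> i.toNat) 1 ≠ 0 then
                  (sc.1 + PySem.List.pyGetD q i 0, sc.2 + 1) else sc)
              (0, 0) (PySem.List.pyRange 0 (q.length : Int) 1)).1 = 0 ∧
            (List.foldl
              (fun (sc : Int × Int) (i : Int) =>
                if PySem.Int.band (mask >>> i.toNat) 1 ≠ 0 then
                  (sc.1 + PySem.List.pyGetD q i 0, sc.2 + 1) else sc)
              (0, 0) (PySem.List.pyRange 0 (q.length : Int) 1)).2 > best.2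
        then (mask,
            (List.foldl
              (fun (sc : Int × Int) (i : Int) =>
                if PySem.Int.band (mask >>> i.toNat) 1 ≠ 0 then
                  (sc.1 + PySem.List.pyGetD q i 0, sc.2 + 1) else sc)
              (0, 0) (PySem.List.pyRange 0 (q.length : Int) 1)).2)
        else best)
      (0, 0) (PySem.List.pyRange 1 ((2 ^ q.length : Nat) : Int) 1)
    = canonA q := by
  have hLoop : ∀ (m : Nat),
      (PySem.List.pyRange 0 (q.length : Int) 1).foldl
        (fun (sc : Int × Int) (i : Int) =>
          if PySem.Int.band (((m : Nat) : Int) >>> i.toNat) 1 ≠ 0 then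
            (sc.1 + PySem.List.pyGetD q i 0, sc.2 + 1) else sc) (0, 0)
      = (bitSum q m, bitCnt q m) := by
    intro m
    have L := loop_eq q m 0 q.length (by omega) 0 0
    simp only [Int.shiftRight_natCast_right, Nat.cast_zero, zero_add, List.drop_zero,
      List.take_length] at L
    exact L
  rw [fold_range_one_shape _
      (fun st m => if bitSum q m = 0 ∧ bitCnt q m > st.2 then (((m : Nat) : Int), bitCnt q m) else st)
      (2 ^ q.length) (by positivity)
      (by
        have hid : ∀ (l : List Int) (sc : Int × Int),
            l.foldl (fun (sc : Int × Int) (i : Int) =>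
              if PySem.Int.band ((0 : Int) >>> i.toNat) 1 ≠ 0 then
                (sc.1 + PySem.List.pyGetD q i 0, sc.2 + 1) else sc) sc = sc := by
          intro l
          induction l with
          | nil => intro sc; rfl
          | cons x t ih =>
              intro sc
              rw [List.foldl_cons, if_neg (by
                rw [Int.zero_shiftRight, show PySem.Int.band (0 : Int) 1 = 0 by
                  rw [PySem.Int.band_comm]; exact PySem.Int.band_zero 1]
                simp)]
              exact ih sc
        simp only [hid]
        simp)
      (fun st m => by rw [hLoop m])]
  rw [show (2 : Nat) ^ q.length = 2 ^ (q.length / 2 + (q.length - q.length / 2)) by congr 1; omega,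
    range_two_pow_flatMap, List.foldl_flatMap]
  unfold canonA
  apply PySem.List.foldl_congr_mem
  intro st hm _
  rw [List.foldl_map]
  have P := perhmA (q.take (q.length / 2)) (q.drop (q.length / 2)) hm st
  rw [List.length_take_of_le (by omega)] at P
  refine Eq.trans (PySem.List.foldl_congr_mem _ _ _ _ ?_) P
  intro acc lm hlm
  rw [bitSum_split q (q.length / 2) (by omega) hm lm (List.mem_range.mp hlm),
    bitCnt_split q (q.length / 2) (by omega) hm lm (List.mem_range.mp hlm)]

theorem int_shiftLeft_natCast_nat (a k : Nat) : ((a : Nat) : Int) <<< k = ((a <<< k : Nat) : Int) := by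
  rw [← Int.shiftLeft_natCast_right, Int.shiftLeft_natCast]

theorem bor_mask (hm lm k : Nat) (h : lm < 2 ^ k) :
    PySem.Int.bor (((hm : Nat) : Int) <<< k) ((lm : Nat) : Int) = ((hm * 2 ^ k + lm : Nat) : Int) := by
  rw [int_shiftLeft_natCast_nat, PySem.Int.bor_natCast]
  congr 1
  rw [Nat.shiftLeft_eq, Nat.mul_comm hm, ← Nat.two_pow_add_eq_or_of_lt h, Nat.mul_comm]

theorem BfoldEq (q : List Int) :
    List.foldl
      (fun (best : Int × Int) (hm : Int) =>
        List.foldl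
          (fun (best : Int × Int) (lc : Int) =>
            match
              (List.foldl
                    (fun (t : PySem.Dict (Int × Int) Int) (lm : Int) =>
                      t.setdefault
                        ((List.foldl
                              (fun (sc : Int × Int) (i : Int) =>
                                if PySem.Int.band (lm >>> i.toNat) 1 ≠ 0 then
                                  (sc.1 + PySem.List.pyGetD q i 0, sc.2 + 1)
                                else sc)
                              (0, 0) (PySem.List.pyRange 0 ((q.length / 2 : Nat) : Int) 1)).1,
                          (List.foldl
                              (fun (sc : Int × Int) (i : Int) =>
                                if PySem.Int.band (lm >>> i.toNat) 1 ≠ 0 then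
                                  (sc.1 + PySem.List.pyGetD q i 0, sc.2 + 1)
                                else sc)
                              (0, 0) (PySem.List.pyRange 0 ((q.length / 2 : Nat) : Int) 1)).2)
                        lm)
                    PySem.Dict.empty (PySem.List.pyRange 0 ((2 ^ (q.length / 2) : Nat) : Int) 1)).get?
                (-(List.foldl
                        (fun (sc : Int × Int) (i : Int) =>
                          if PySem.Int.band (hm >>> i.toNat) 1 ≠ 0 then
                            (sc.1 + PySem.List.pyGetD q (((q.length / 2 : Nat) : Int) + i) 0, sc.2 + 1)
                          else sc)
                        (0, 0) (PySem.List.pyRange 0 ((q.length - q.length / 2 : Nat) : Int) 1)).1,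
                  lc) with
            | some lm =>
              if
                  (List.foldl
                          (fun (sc : Int × Int) (i : Int) =>
                            if PySem.Int.band (hm >>> i.toNat) 1 ≠ 0 then
                              (sc.1 + PySem.List.pyGetD q (((q.length / 2 : Nat) : Int) + i) 0, sc.2 + 1)
                            else sc)
                          (0, 0) (PySem.List.pyRange 0 ((q.length - q.length / 2 : Nat) : Int) 1)).2 +
                      lc >
                    best.2 then
                (PySem.Int.bor (hm <<< (q.length / 2)) lm,
                  (List.foldl
                        (fun (sc : Int × Int) (i : Int) =>
                          if PySem.Int.band (hm >>> i.toNat) 1 ≠ 0 then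
                            (sc.1 + PySem.List.pyGetD q (((q.length / 2 : Nat) : Int) + i) 0, sc.2 + 1)
                          else sc)
                        (0, 0) (PySem.List.pyRange 0 ((q.length - q.length / 2 : Nat) : Int) 1)).2 +
                    lc)
              else best
            | none => best)
          best (PySem.List.pyRange 0 ((q.length / 2 + 1 : Nat) : Int) 1))
      (0, 0) (PySem.List.pyRange 0 ((2 ^ (q.length - q.length / 2) : Nat) : Int) 1)
    = canonB q := by
  have hLoopLow : ∀ (m : Nat),
      (PySem.List.pyRange 0 ((q.length / 2 : Nat) : Int) 1).foldl
        (fun (sc : Int × Int) (i : Int) =>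
          if PySem.Int.band (((m : Nat) : Int) >>> i.toNat) 1 ≠ 0 then
            (sc.1 + PySem.List.pyGetD q i 0, sc.2 + 1) else sc) (0, 0)
      = (bitSum (q.take (q.length / 2)) m, bitCnt (q.take (q.length / 2)) m) := by
    intro m
    have L := loop_eq q m 0 (q.length / 2) (by omega) 0 0
    simp only [Int.shiftRight_natCast_right, Nat.cast_zero, zero_add, List.drop_zero] at L
    exact L
  have hLoopHigh : ∀ (m : Nat),
      (PySem.List.pyRange 0 ((q.length - q.length / 2 : Nat) : Int) 1).foldl
        (fun (sc : Int × Int) (i : Int) =>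
          if PySem.Int.band (((m : Nat) : Int) >>> i.toNat) 1 ≠ 0 then
            (sc.1 + PySem.List.pyGetD q (((q.length / 2 : Nat) : Int) + i) 0, sc.2 + 1) else sc) (0, 0)
      = (bitSum (q.drop (q.length / 2)) m, bitCnt (q.drop (q.length / 2)) m) := by
    intro m
    have L := loop_eq q m (q.length / 2) (q.length - q.length / 2) (by omega) 0 0
    simp only [Int.shiftRight_natCast_right, Nat.cast_zero, zero_add] at L
    rw [show (q.drop (q.length / 2)).take (q.length - q.length / 2)
        = (q.drop (q.length / 2)).take ((q.drop (q.length / 2)).length) by rw [List.length_drop]] at L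
    rw [List.take_length] at L
    exact L
  have htab : (PySem.List.pyRange 0 ((2 ^ (q.length / 2) : Nat) : Int) 1).foldl
      (fun (t : PySem.Dict (Int × Int) Int) (lm : Int) =>
        t.setdefault
          ((List.foldl
                (fun (sc : Int × Int) (i : Int) =>
                  if PySem.Int.band (lm >>> i.toNat) 1 ≠ 0 then
                    (sc.1 + PySem.List.pyGetD q i 0, sc.2 + 1)
                  else sc)
                (0, 0) (PySem.List.pyRange 0 ((q.length / 2 : Nat) : Int) 1)).1,
            (List.foldl
                (fun (sc : Int × Int) (i : Int) =>
                  if PySem.Int.band (lm >>> i.toNat) 1 ≠ 0 then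
                    (sc.1 + PySem.List.pyGetD q i 0, sc.2 + 1)
                  else sc)
                (0, 0) (PySem.List.pyRange 0 ((q.length / 2 : Nat) : Int) 1)).2)
          lm) PySem.Dict.empty
      = (List.range (2 ^ (q.length / 2))).foldl
          (fun t lm => t.setdefault (bitSum (q.take (q.length / 2)) lm, bitCnt (q.take (q.length / 2)) lm)
            ((lm : Nat) : Int)) PySem.Dict.empty := by
    refine fold_range_shape _ _ _ _ (fun t m => ?_)
    rw [hLoopLow m]
  rw [htab]
  have hget : ∀ key, ((List.range (2 ^ (q.length / 2))).foldl
      (fun t lm => t.setdefault (bitSum (q.take (q.length / 2)) lm, bitCnt (q.take (q.length / 2)) lm)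
        ((lm : Nat) : Int)) PySem.Dict.empty).get? key
      = ((List.range (2 ^ (q.length / 2))).find?
          (fun lm => (bitSum (q.take (q.length / 2)) lm, bitCnt (q.take (q.length / 2)) lm) == key)).map
            (fun lm => ((lm : Nat) : Int)) := by
    intro key
    rw [fold_setdefault_get (fun lm => (bitSum (q.take (q.length / 2)) lm, bitCnt (q.take (q.length / 2)) lm))]
    rfl
  simp only [hget]
  refine fold_range_shape _ _ _ _ (fun st hm => ?_)
  simp only [hLoopHigh hm]
  refine Eq.trans (fold_range_shape _
    (fun st (lc : Nat) =>
      match ((List.range (2 ^ (q.length / 2))).find?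
          (fun lm => (bitSum (q.take (q.length / 2)) lm, bitCnt (q.take (q.length / 2)) lm)
            == (-(bitSum (q.drop (q.length / 2)) hm), ((lc : Nat) : Int)))).map
        (fun lm => (((hm * 2 ^ (q.length / 2) + lm : Nat) : Int),
          bitCnt (q.drop (q.length / 2)) hm + ((lc : Nat) : Int))) with
      | some e => upd st e
      | none => st)
    (q.length / 2 + 1) st (fun st2 lc => ?_)) ?_
  · -- inner body conversion
    cases hF : (List.range (2 ^ (q.length / 2))).find?
        (fun lm => (bitSum (q.take (q.length / 2)) lm, bitCnt (q.take (q.length / 2)) lm)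
          == (-(bitSum (q.drop (q.length / 2)) hm), ((lc : Nat) : Int))) with
    | none => simp only [hF, Option.map_none]
    | some lm =>
        simp only [hF, Option.map_some]
        have hlm : lm < 2 ^ (q.length / 2) := List.mem_range.mp (List.mem_of_find?_eq_some hF)
        rw [bor_mask hm lm (q.length / 2) hlm]
        rfl
  · -- fold over the candidates list
    unfold candsB
    rw [List.foldl_filterMap]
    simp only [List.length_take_of_le (show q.length / 2 ≤ q.length by omega)]
    refine PySem.List.foldl_congr_mem _ _ _ _ (fun acc lc _ => ?_)
    cases hx : (Option.map (fun lm => ((((hm * 2 ^ (q.length / 2) + lm : Nat)) : Int),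
        bitCnt (List.drop (q.length / 2) q) hm + ((lc : Nat) : Int)))
        (List.find? (fun lm => (bitSum (List.take (q.length / 2) q) lm, bitCnt (List.take (q.length / 2) q) lm)
            == (-bitSum (List.drop (q.length / 2) q) hm, ((lc : Nat) : Int)))
          (List.range (2 ^ (q.length / 2))))) with
    | none => simp only [hx]
    | some e => simp only [hx]

theorem canonAB (q : List Int) : canonA q = canonB q := by
  unfold canonA canonB
  exact PySem.List.foldl_congr_mem _ _ _ _ (fun st hm _ => cands_fold_eq _ _ _ _ _)

theorem main_eq (q : List Int) : find_zero_sum_indices_py q = find_zero_sum_indices_py_alt q := by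
  unfold find_zero_sum_indices_py find_zero_sum_indices_py_alt
  by_cases h0 : (q.length : Int) = 0
  · rw [if_pos h0]
    have : q = [] := by simpa using h0
    subst this
    simp
  · rw [if_neg h0]
    by_cases hs : q.sum = 0
    · rw [if_pos hs, if_pos hs]
    · rw [if_neg hs, if_neg hs]
      by_cases h24 : (24 : Int) < (q.length : Int)
      · rw [if_pos h24, if_pos h24]
      · rw [if_neg h24, if_neg h24]
        simp only [Int.shiftRight_natCast_right, Int.toNat_natCast]
        rw [show PySem.Int.floordiv ((q.length : Nat) : Int) 2 = ((q.length / 2 : Nat) : Int) from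
          by exact_mod_cast PySem.Int.floordiv_natCast q.length 2]
        simp only [Int.toNat_natCast]
        rw [show ((q.length : Int) - ((q.length / 2 : Nat) : Int)) = (((q.length - q.length / 2 : Nat) : Nat) : Int) from
          by push_cast [Nat.cast_sub (Nat.div_le_self _ _)]; ring]
        simp only [Int.toNat_natCast]
        simp only [show (1 : Int) <<< q.length = ((2 ^ q.length : Nat) : Int) from
            by rw [Int.shiftLeft_eq]; push_cast; ring,
          show (1 : Int) <<< (q.length - q.length / 2) = ((2 ^ (q.length - q.length / 2) : Nat) : Int) from
            by rw [Int.shiftLeft_eq]; push_cast; ring,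
          show (1 : Int) <<< (q.length / 2) = ((2 ^ (q.length / 2) : Nat) : Int) from
            by rw [Int.shiftLeft_eq]; push_cast; ring,
          show (((q.length / 2 : Nat) : Int) + 1) = (((q.length / 2 + 1 : Nat) : Nat) : Int) from
            by push_cast; ring]
        simp only [AfoldEq q, BfoldEq q, canonAB q]

-- ===== VERDICT (by name: the statement is the Claim_ definition above) =====
theorem find_zero_sum_indices_py_spec : Claim_equal_find_zero_sum_indices_py := by
  intro quantities _
  exact main_eq quantities
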